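-- pv_equiv track=rewrite | github.com/bwaldon/crossling_reference | simulations/stefan_simulations/stefanModels/stefanAllScenarios.py | getWordType
-- ===== SOURCE A (Python) =====
-- nounDict = ["plate_masc", "cup_fem", "knife_masc"]
--
-- colorDict = ["blue_masc", "blue_fem", "blue_neut", "red_masc", "red_fem", "red_neut"]
--
-- sizeDict = ["big_masc", "big_fem", "big_neut", "small_masc", "small_fem", "small_neut"]
--
-- def getWordType(words):
--     colorAdj = []
--     sizeAdj = []
--     nouns = []
--     #iterate through all words
--     for word in words:
--         #get color adjectives
--         if word in colorDict:
--             colorAdj.append(word)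
--         #get size adjectives
--         elif word in sizeDict:
--             sizeAdj.append(word)
--         #get nouns
--         elif word in nounDict:
--             nouns.append(word)
--
--     return [sizeAdj, colorAdj, nouns]
-- ===== SOURCE B (Python) =====
-- nounDict = ["plate_masc", "cup_fem", "knife_masc"]
-- colorDict = ["blue_masc", "blue_fem", "blue_neut", "red_masc", "red_fem", "red_neut"]
-- sizeDict = ["big_masc", "big_fem", "big_neut", "small_masc", "small_fem", "small_neut"]
--
-- def getWordType(words):
--     # three independent filtering passes; the categories are disjoint,
--     # so order and duplicates match the single guarded loop exactly
--     return [[w for w in words if w in sizeDict],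
--             [w for w in words if w in colorDict],
--             [w for w in words if w in nounDict]]
-- ===== Notes on version B (the rewrite author's own statement) =====
-- stated objective: simpler
-- what changed: Replaces the single if/elif accumulator loop with three independent filter passes, one per category; disjointness of the three word lists makes this exact.
import Mathlib
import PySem

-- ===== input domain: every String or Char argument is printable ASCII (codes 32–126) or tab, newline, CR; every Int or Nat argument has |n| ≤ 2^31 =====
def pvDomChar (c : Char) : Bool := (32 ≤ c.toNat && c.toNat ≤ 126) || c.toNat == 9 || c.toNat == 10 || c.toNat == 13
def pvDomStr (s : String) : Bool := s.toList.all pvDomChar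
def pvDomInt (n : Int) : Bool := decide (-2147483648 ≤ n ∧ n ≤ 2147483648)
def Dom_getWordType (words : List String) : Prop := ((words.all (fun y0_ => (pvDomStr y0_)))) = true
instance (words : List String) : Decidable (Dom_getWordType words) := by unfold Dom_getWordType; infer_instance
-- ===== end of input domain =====

-- B replaces A's single if/elif accumulator loop by three independent filter passes (objective: simpler).

def nounDict : List String := ["plate_masc", "cup_fem", "knife_masc"]
def colorDict : List String := ["blue_masc", "blue_fem", "blue_neut", "red_masc", "red_fem", "red_neut"]
def sizeDict : List String := ["big_masc", "big_fem", "big_neut", "small_masc", "small_fem", "small_neut"]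

-- ===== PORT A =====
-- single pass, if/elif chain, three accumulators (colorAdj, sizeAdj, nouns)
def stepA (st : List String × List String × List String) (word : String) :
    List String × List String × List String :=
  let (colorAdj, sizeAdj, nouns) := st
  if colorDict.contains word then (colorAdj ++ [word], sizeAdj, nouns)
  else if sizeDict.contains word then (colorAdj, sizeAdj ++ [word], nouns)
  else if nounDict.contains word then (colorAdj, sizeAdj, nouns ++ [word])
  else (colorAdj, sizeAdj, nouns)

def getWordType (words : List String) : List (List String) :=
  let st := words.foldl stepA ([], [], [])
  [st.2.1, st.1, st.2.2]

-- ===== PORT B =====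
-- three independent filter passes
def getWordType_alt (words : List String) : List (List String) :=
  [words.filter (fun w => sizeDict.contains w),
   words.filter (fun w => colorDict.contains w),
   words.filter (fun w => nounDict.contains w)]

-- ===== PRECONDITION & SPEC =====
def Spec_getWordType (words : List String) (out : List (List String)) : Prop := out = getWordType_alt words
instance (words : List String) (out : List (List String)) : Decidable (Spec_getWordType words out) := by unfold Spec_getWordType; infer_instance

-- ===== CLAIM (what is proved, stated in full; the proofs are below) =====
def Claim_equal_getWordType : Prop := ∀ (words : List String), Dom_getWordType words → Spec_getWordType words (getWordType words)

-- ===== LEMMAS AND PROOFS =====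

-- loop invariant: A's fold from any starting accumulators appends exactly the three filters
theorem getWordType_loop (words : List String) (c s n : List String) :
    words.foldl stepA (c, s, n)
    = (c ++ words.filter (fun w => colorDict.contains w),
       s ++ words.filter (fun w => sizeDict.contains w),
       n ++ words.filter (fun w => nounDict.contains w)) := by
  induction words generalizing c s n with
  | nil => simp
  | cons w ws ih =>
    rw [List.foldl_cons]
    by_cases hc : w ∈ colorDict
    · have hs : w ∉ sizeDict := by
        intro h; simp [sizeDict] at h; rcases h with h|h|h|h|h|h <;> subst h <;> simp [colorDict] at hc
      have hn : w ∉ nounDict := by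
        intro h; simp [nounDict] at h; rcases h with h|h|h <;> subst h <;> simp [colorDict] at hc
      have hstep : stepA (c, s, n) w = (c ++ [w], s, n) := by simp [stepA, hc]
      rw [hstep, ih]
      simp [List.filter_cons, hc, hs, hn]
    · by_cases hs : w ∈ sizeDict
      · have hn : w ∉ nounDict := by
          intro h; simp [nounDict] at h; rcases h with h|h|h <;> subst h <;> simp [sizeDict] at hs
        have hstep : stepA (c, s, n) w = (c, s ++ [w], n) := by simp [stepA, hc, hs]
        rw [hstep, ih]
        simp [List.filter_cons, hc, hs, hn]
      · by_cases hn : w ∈ nounDict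
        · have hstep : stepA (c, s, n) w = (c, s, n ++ [w]) := by simp [stepA, hc, hs, hn]
          rw [hstep, ih]
          simp [List.filter_cons, hc, hs, hn]
        · have hstep : stepA (c, s, n) w = (c, s, n) := by simp [stepA, hc, hs, hn]
          rw [hstep, ih]
          simp [List.filter_cons, hc, hs, hn]

-- ===== VERDICT (by name: the statement is the Claim_ definition above) =====
theorem getWordType_spec : Claim_equal_getWordType := by
  intro words _
  unfold Spec_getWordType getWordType getWordType_alt
  rw [getWordType_loop]
  simp
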